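-- pv_equiv track=rewrite | github.com/scottonanski/persistent-mind-model-v1.0 | pmm/core/enhancements/meta_reflection_engine.py | _window_patterns
-- ===== SOURCE A (Python) =====
-- from typing import Any, Dict, Iterable, List
--
-- def _window_patterns(
--     windows: Iterable[List[Dict[str, Any]]]
-- ) -> List[Dict[str, int]]:
--     patterns: List[Dict[str, int]] = []
--     for window in windows:
--         opens = sum(1 for ev in window if ev.get("kind") == "commitment_open")
--         closes = sum(1 for ev in window if ev.get("kind") == "commitment_close")
--         reflections = sum(1 for ev in window if ev.get("kind") == "reflection")
--         patterns.append(
--             {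
--                 "commitment_open": opens,
--                 "commitment_close": closes,
--                 "reflection": reflections,
--             }
--         )
--     return patterns
-- ===== SOURCE B (Python) =====
-- from typing import Any, Dict, Iterable, List
--
-- def _window_counts(window: List[Dict[str, Any]]) -> Dict[str, int]:
--     opens = closes = reflections = 0
--     for ev in window:
--         kind = ev.get("kind")
--         if kind == "commitment_open":
--             opens += 1
--         elif kind == "commitment_close":
--             closes += 1
--         elif kind == "reflection":
--             reflections += 1
--     return {
--         "commitment_open": opens,
--         "commitment_close": closes,
--         "reflection": reflections,
--     }
--
-- def _window_patterns(
--     windows: Iterable[List[Dict[str, Any]]]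
-- ) -> List[Dict[str, int]]:
--     return [_window_counts(window) for window in windows]
-- ===== Notes on version B (the rewrite author's own statement) =====
-- stated objective: simpler
-- what changed: Instead of three separate counting scans per window appended in a loop, B maps a helper over the windows that makes one pass per window with a branch-dispatched triple of accumulators (opens/closes/reflections).
import Mathlib
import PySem

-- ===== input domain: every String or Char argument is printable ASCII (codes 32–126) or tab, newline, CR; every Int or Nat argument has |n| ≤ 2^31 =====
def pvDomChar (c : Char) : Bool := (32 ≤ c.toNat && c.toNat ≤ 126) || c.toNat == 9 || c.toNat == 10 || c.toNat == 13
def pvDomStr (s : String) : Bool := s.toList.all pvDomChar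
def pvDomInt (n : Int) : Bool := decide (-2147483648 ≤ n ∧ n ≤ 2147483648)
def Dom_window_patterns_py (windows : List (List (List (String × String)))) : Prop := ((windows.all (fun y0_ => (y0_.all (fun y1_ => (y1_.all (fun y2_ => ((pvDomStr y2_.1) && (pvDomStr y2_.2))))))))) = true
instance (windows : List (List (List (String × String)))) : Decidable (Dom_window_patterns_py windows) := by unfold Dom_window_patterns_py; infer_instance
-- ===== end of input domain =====

-- B replaces A's three separate counting scans per window by a helper mapped over the
-- windows that makes ONE pass per window with a branch-dispatched triple of accumulators
-- (objective: simpler).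

-- ===== PORT A =====
-- Literal port of A: for each window three separate 0/1 counting passes, then the three-key dict.
def window_patterns_py (windows : List (List (List (String × String)))) : List (List (String × Int)) :=
  windows.foldl (fun patterns window =>
    let opens : Int := window.foldl (fun acc ev =>
      if (PySem.Dict.mk ev).get? "kind" == some "commitment_open" then acc + 1 else acc) 0
    let closes : Int := window.foldl (fun acc ev =>
      if (PySem.Dict.mk ev).get? "kind" == some "commitment_close" then acc + 1 else acc) 0
    let reflections : Int := window.foldl (fun acc ev =>
      if (PySem.Dict.mk ev).get? "kind" == some "reflection" then acc + 1 else acc) 0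
    patterns ++ [[("commitment_open", opens), ("commitment_close", closes), ("reflection", reflections)]]) []

-- ===== PORT B =====
-- B's helper _window_counts: one pass with a triple of accumulators, elif dispatch.
def windowCountsStep (s : Int × Int × Int) (ev : List (String × String)) : Int × Int × Int :=
  let kind := (PySem.Dict.mk ev).get? "kind"
  if kind == some "commitment_open" then (s.1 + 1, s.2.1, s.2.2)
  else if kind == some "commitment_close" then (s.1, s.2.1 + 1, s.2.2)
  else if kind == some "reflection" then (s.1, s.2.1, s.2.2 + 1)
  else s

def windowCounts (window : List (List (String × String))) : List (String × Int) :=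
  let s := window.foldl windowCountsStep (0, 0, 0)
  [("commitment_open", s.1), ("commitment_close", s.2.1), ("reflection", s.2.2)]

-- Literal port of B: the list comprehension mapping _window_counts over the windows.
def window_patterns_py_alt (windows : List (List (List (String × String)))) : List (List (String × Int)) :=
  windows.map windowCounts

-- ===== PRECONDITION & SPEC =====
def Spec_window_patterns_py (windows : List (List (List (String × String)))) (out : List (List (String × Int))) : Prop := out = window_patterns_py_alt windows
instance (windows : List (List (List (String × String)))) (out : List (List (String × Int))) : Decidable (Spec_window_patterns_py windows out) := by unfold Spec_window_patterns_py; infer_instance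

-- ===== CLAIM (what is proved, stated in full; the proofs are below) =====
def Claim_equal_window_patterns_py : Prop := ∀ (windows : List (List (List (String × String)))), Dom_window_patterns_py windows → Spec_window_patterns_py windows (window_patterns_py windows)

-- ===== LEMMAS AND PROOFS =====

-- B's single pass computes, in each component, the count of the corresponding kind.
theorem windowCounts_fold (window : List (List (String × String))) :
    ∀ (o c r : Int), window.foldl windowCountsStep (o, c, r) =
      (o + (window.countP (fun ev => (PySem.Dict.mk ev).get? "kind" == some "commitment_open") : Int),
       c + (window.countP (fun ev => (PySem.Dict.mk ev).get? "kind" == some "commitment_close") : Int),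
       r + (window.countP (fun ev => (PySem.Dict.mk ev).get? "kind" == some "reflection") : Int)) := by
  induction window with
  | nil => intro o c r; simp
  | cons ev t ih =>
    intro o c r
    simp only [List.foldl_cons, List.countP_cons, windowCountsStep]
    by_cases h1 : (PySem.Dict.mk ev).get? "kind" = some "commitment_open"
    · simp [h1, ih]; ring
    · by_cases h2 : (PySem.Dict.mk ev).get? "kind" = some "commitment_close"
      · simp [h2, ih]; ring
      · by_cases h3 : (PySem.Dict.mk ev).get? "kind" = some "reflection"
        · simp [h3, ih]; ring
        · simp [beq_iff_eq, h1, h2, h3, ih]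

-- ===== VERDICT (by name: the statement is the Claim_ definition above) =====
theorem window_patterns_py_spec : Claim_equal_window_patterns_py := by
  intro windows _
  unfold Spec_window_patterns_py window_patterns_py window_patterns_py_alt
  rw [PySem.List.foldl_append_singleton_eq_map]
  simp only [List.nil_append]
  refine List.map_congr_left fun w _ => ?_
  simp only [windowCounts, windowCounts_fold, PySem.List.foldl_if_add_one, zero_add]
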